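-- pv_equiv track=rewrite | github.com/Jw705/Algorithm | 프로그래머스/1/133499. 옹알이 （2）/옹알이 （2）.py | solution
-- ===== SOURCE A (Python) =====
-- def solution(babbling):
--     answer = 0
--     possible_word = ["aya", "ye", "woo", "ma"]
--
--     for word in babbling:
--         prev_word = ""
--         tmp=""
--         for w in word:
--             tmp+=w
--             if tmp in possible_word and tmp!=prev_word:
--                 prev_word = tmp
--                 tmp=""
--         if tmp=="":
--             answer+=1
--
--     return answer
-- ===== SOURCE B (Python) =====
-- def solution(babbling):
--     allowed = ["aya", "ye", "woo", "ma"]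
--     answer = 0
--     for word in babbling:
--         i = 0
--         prev = ""
--         while i < len(word):
--             for w in allowed:
--                 if w != prev and word.startswith(w, i):
--                     i += len(w)
--                     prev = w
--                     break
--             else:
--                 break
--         if i == len(word):
--             answer += 1
--     return answer
-- ===== Notes on version B (the rewrite author's own statement) =====
-- stated objective: alternative
-- what changed: Replaces A's character-by-character accumulation of a growing buffer tested against the word list with a position-pointer parse that tries each allowed word as a prefix at the current index and jumps by its length (exact because the four words are prefix-free).
import Mathlib
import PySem

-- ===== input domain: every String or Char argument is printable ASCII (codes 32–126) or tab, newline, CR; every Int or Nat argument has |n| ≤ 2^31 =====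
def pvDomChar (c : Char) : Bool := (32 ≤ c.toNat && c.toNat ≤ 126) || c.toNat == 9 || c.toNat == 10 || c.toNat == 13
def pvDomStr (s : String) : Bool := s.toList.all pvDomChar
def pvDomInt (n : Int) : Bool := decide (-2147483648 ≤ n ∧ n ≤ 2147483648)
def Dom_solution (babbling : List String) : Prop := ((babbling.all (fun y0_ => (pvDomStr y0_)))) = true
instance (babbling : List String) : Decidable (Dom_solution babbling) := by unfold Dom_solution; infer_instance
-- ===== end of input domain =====

-- B replaces A's growing-buffer character scan by a position-pointer parse over the allowed words (alternative decomposition, same cost).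

-- ===== PORT A =====
-- strings are handled as their character lists (exact for the `in`-membership, `!=` and `+=` operations A performs)
def possibleA : List (List Char) := [['a','y','a'], ['y','e'], ['w','o','o'], ['m','a']]

def stepA (s : List Char × List Char) (c : Char) : List Char × List Char :=
  let tmp := s.2 ++ [c]
  if tmp ∈ possibleA ∧ tmp ≠ s.1 then (tmp, []) else (s.1, tmp)

def solution (babbling : List String) : Int :=
  babbling.foldl (fun answer word =>
    if (word.toList.foldl stepA ([], [])).2 = [] then answer + 1 else answer) 0

-- ===== PORT B =====
def allowedB : List (List Char) := [['a','y','a'], ['y','e'], ['w','o','o'], ['m','a']]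

-- Source B's position pointer i is represented by the remaining suffix cs = word[i:];
-- the for/else over allowed is find?, startswith(w, i) is w.isPrefixOf cs
def parseB (prev cs : List Char) : Bool :=
  if h : cs = [] then true
  else
    match hf : allowedB.find? (fun w => decide (w ≠ prev) && w.isPrefixOf cs) with
    | none => false
    | some w => parseB w (cs.drop w.length)
termination_by cs.length
decreasing_by
  have hw : w ∈ allowedB := List.mem_of_find?_eq_some hf
  have h1 : 1 ≤ w.length := by fin_cases hw <;> simp
  have h2 : 0 < cs.length := List.length_pos_of_ne_nil h
  simp only [List.length_drop]; omega

def solution_alt (babbling : List String) : Int :=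
  babbling.foldl (fun answer word =>
    if parseB [] word.toList then answer + 1 else answer) 0

-- ===== PRECONDITION & SPEC =====
def Spec_solution (babbling : List String) (out : Int) : Prop := out = solution_alt babbling
instance (babbling : List String) (out : Int) : Decidable (Spec_solution babbling out) := by unfold Spec_solution; infer_instance

-- ===== CLAIM (what is proved, stated in full; the proofs are below) =====
def Claim_equal_solution : Prop := ∀ (babbling : List String), Dom_solution babbling → Spec_solution babbling (solution babbling)

-- ===== LEMMAS AND PROOFS =====

lemma parseB_nil (prev : List Char) : parseB prev [] = true := by simp [parseB]

lemma parseB_cons (prev : List Char) (c : Char) (cs : List Char) :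
    parseB prev (c :: cs) = match allowedB.find? (fun w => decide (w ≠ prev) && w.isPrefixOf (c :: cs)) with
      | none => false
      | some w => parseB w ((c :: cs).drop w.length) := by
  rw [parseB, dif_neg (List.cons_ne_nil c cs)]
  rcases h : allowedB.find? (fun w => decide (w ≠ prev) && w.isPrefixOf (c :: cs)) with _ | w <;> simp [h]

lemma pvBeqFalse {c d : Char} (h : ¬ d = c) : (c == d) = false := by
  simp only [beq_eq_false_iff_ne]; exact fun he => h he.symm

-- once tmp is nonempty and can only reach an allowed word equal to itself and to prev, A's inner loop never resets it
lemma stuckA (cs : List Char) : ∀ (prev tmp : List Char), tmp ≠ [] →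
    (∀ w ∈ possibleA, tmp <+: w → w = tmp ∧ tmp = prev) →
    (cs.foldl stepA (prev, tmp)).2 ≠ [] := by
  induction cs with
  | nil => intro prev tmp h _; simpa using h
  | cons c cs ih =>
    intro prev tmp h h2
    simp only [List.foldl_cons, stepA]
    have hne : ¬ (tmp ++ [c] ∈ possibleA ∧ tmp ++ [c] ≠ prev) := by
      rintro ⟨hm, _⟩
      have h3 := h2 _ hm ⟨[c], rfl⟩
      have hlen : (tmp ++ [c]).length = tmp.length := by rw [h3.1]
      simp at hlen
    rw [if_neg hne]
    apply ih
    · simp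
    · intro w hw hp
      exfalso
      have hp' : tmp <+: w := List.IsPrefix.trans ⟨[c], rfl⟩ hp
      have h3 := h2 w hw hp'
      have h4 : tmp ++ [c] <+: tmp := h3.1 ▸ hp
      have := h4.length_le
      simp at this

-- the central bridge: A's buffer scan succeeds iff B's pointer parse succeeds
lemma mainA : ∀ (n : Nat) (cs prev : List Char), cs.length ≤ n →
    (((cs.foldl stepA (prev, [])).2 = []) ↔ parseB prev cs = true) := by
  intro n
  induction n with
  | zero =>
    intro cs prev h
    have hnil : cs = [] := List.eq_nil_of_length_eq_zero (Nat.le_zero.mp h)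
    subst hnil
    simp [parseB_nil]
  | succ n ih =>
    intro cs prev hlen
    match cs with
    | [] => simp [parseB_nil]
    | c :: cs1 =>
      rw [parseB_cons]
      by_cases hca : c = 'a'
      · subst hca
        match cs1 with
        | [] =>
          simp_all [allowedB, List.find?, List.isPrefixOf, stepA, possibleA]
        | d :: cs2 =>
          by_cases hd : d = 'y'
          · subst hd
            match cs2 with
            | [] =>
              simp_all [allowedB, List.find?, List.isPrefixOf, stepA, possibleA]
            | e :: cs3 =>
              by_cases he : e = 'a'
              · subst he
                by_cases hp : prev = ['a','y','a']
                · subst hp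
                  have hA := stuckA cs3 ['a','y','a'] ['a','y','a'] (by simp)
                    (by intro w hw hpf; fin_cases hw <;> simp_all [List.cons_prefix_cons])
                  simp_all [allowedB, List.find?, List.isPrefixOf, stepA, possibleA]
                · have key := ih cs3 ['a','y','a'] (by simp at hlen ⊢; omega)
                  simp_all [allowedB, List.find?, List.isPrefixOf, stepA, possibleA, Ne.symm hp]
              · have hA := stuckA cs3 prev ['a','y',e] (by simp)
                  (by intro w hw hpf; exfalso; fin_cases hw <;> simp_all [List.cons_prefix_cons])
                simp_all [allowedB, List.find?, List.isPrefixOf, stepA, possibleA, pvBeqFalse he]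
          · have hA := stuckA cs2 prev ['a',d] (by simp)
              (by intro w hw hpf; exfalso; fin_cases hw <;> simp_all [List.cons_prefix_cons])
            simp_all [allowedB, List.find?, List.isPrefixOf, stepA, possibleA, pvBeqFalse hd]
      · by_cases hcy : c = 'y'
        · subst hcy
          match cs1 with
          | [] =>
            simp_all [allowedB, List.find?, List.isPrefixOf, stepA, possibleA]
          | d :: cs2 =>
            by_cases hd : d = 'e'
            · subst hd
              by_cases hp : prev = ['y','e']
              · subst hp
                have hA := stuckA cs2 ['y','e'] ['y','e'] (by simp)
                  (by intro w hw hpf; fin_cases hw <;> simp_all [List.cons_prefix_cons])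
                simp_all [allowedB, List.find?, List.isPrefixOf, stepA, possibleA]
              · have key := ih cs2 ['y','e'] (by simp at hlen ⊢; omega)
                simp_all [allowedB, List.find?, List.isPrefixOf, stepA, possibleA, Ne.symm hp]
            · have hA := stuckA cs2 prev ['y',d] (by simp)
                (by intro w hw hpf; exfalso; fin_cases hw <;> simp_all [List.cons_prefix_cons])
              simp_all [allowedB, List.find?, List.isPrefixOf, stepA, possibleA, pvBeqFalse hd]
        · by_cases hcw : c = 'w'
          · subst hcw
            match cs1 with
            | [] =>
              simp_all [allowedB, List.find?, List.isPrefixOf, stepA, possibleA]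
            | d :: cs2 =>
              by_cases hd : d = 'o'
              · subst hd
                match cs2 with
                | [] =>
                  simp_all [allowedB, List.find?, List.isPrefixOf, stepA, possibleA]
                | e :: cs3 =>
                  by_cases he : e = 'o'
                  · subst he
                    by_cases hp : prev = ['w','o','o']
                    · subst hp
                      have hA := stuckA cs3 ['w','o','o'] ['w','o','o'] (by simp)
                        (by intro w hw hpf; fin_cases hw <;> simp_all [List.cons_prefix_cons])
                      simp_all [allowedB, List.find?, List.isPrefixOf, stepA, possibleA]
                    · have key := ih cs3 ['w','o','o'] (by simp at hlen ⊢; omega)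
                      simp_all [allowedB, List.find?, List.isPrefixOf, stepA, possibleA, Ne.symm hp]
                  · have hA := stuckA cs3 prev ['w','o',e] (by simp)
                      (by intro w hw hpf; exfalso; fin_cases hw <;> simp_all [List.cons_prefix_cons])
                    simp_all [allowedB, List.find?, List.isPrefixOf, stepA, possibleA, pvBeqFalse he]
              · have hA := stuckA cs2 prev ['w',d] (by simp)
                  (by intro w hw hpf; exfalso; fin_cases hw <;> simp_all [List.cons_prefix_cons])
                simp_all [allowedB, List.find?, List.isPrefixOf, stepA, possibleA, pvBeqFalse hd]
          · by_cases hcm : c = 'm'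
            · subst hcm
              match cs1 with
              | [] =>
                simp_all [allowedB, List.find?, List.isPrefixOf, stepA, possibleA]
              | d :: cs2 =>
                by_cases hd : d = 'a'
                · subst hd
                  by_cases hp : prev = ['m','a']
                  · subst hp
                    have hA := stuckA cs2 ['m','a'] ['m','a'] (by simp)
                      (by intro w hw hpf; fin_cases hw <;> simp_all [List.cons_prefix_cons])
                    simp_all [allowedB, List.find?, List.isPrefixOf, stepA, possibleA]
                  · have key := ih cs2 ['m','a'] (by simp at hlen ⊢; omega)
                    simp_all [allowedB, List.find?, List.isPrefixOf, stepA, possibleA, Ne.symm hp]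
                · have hA := stuckA cs2 prev ['m',d] (by simp)
                    (by intro w hw hpf; exfalso; fin_cases hw <;> simp_all [List.cons_prefix_cons])
                  simp_all [allowedB, List.find?, List.isPrefixOf, stepA, possibleA, pvBeqFalse hd]
            · have hA := stuckA cs1 prev [c] (by simp)
                (by intro w hw hpf; exfalso; fin_cases hw <;> simp_all [List.cons_prefix_cons])
              simp_all [allowedB, List.find?, List.isPrefixOf, stepA, possibleA,
                pvBeqFalse hca, pvBeqFalse hcy, pvBeqFalse hcw, pvBeqFalse hcm]

lemma perWord (word : List Char) :
    ((word.foldl stepA ([], [])).2 = []) ↔ parseB [] word = true :=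
  mainA word.length word [] le_rfl

lemma foldCount (l : List String) : ∀ (a : Int),
    l.foldl (fun answer word => if (word.toList.foldl stepA ([], [])).2 = [] then answer + 1 else answer) a =
    l.foldl (fun answer word => if parseB [] word.toList then answer + 1 else answer) a := by
  induction l with
  | nil => intro a; rfl
  | cons x xs ih =>
    intro a
    simp only [List.foldl_cons]
    by_cases h : parseB [] x.toList = true
    · rw [if_pos ((perWord x.toList).2 h), if_pos h, ih]
    · rw [if_neg (fun hh => h ((perWord x.toList).1 hh)), if_neg (by simp [h]), ih]

-- ===== VERDICT (by name: the statement is the Claim_ definition above) =====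
theorem solution_spec : Claim_equal_solution := by
  intro babbling _
  unfold Spec_solution solution solution_alt
  exact foldCount babbling 0
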